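-- pv_equiv track=rewrite | github.com/SpaceCatleta/Python_DiscordBot | _newLib/messagesProcessing.py | text_len
-- ===== SOURCE A (Python) =====
-- def text_len(stroke: str):
--     counter: int = 0
--     isCount: bool = True
--     for sym in stroke:
--         if sym == '<':
--             isCount = False
--         elif sym == '>':
--             isCount = True
--             continue
--         if isCount:
--             counter += 1
--     return counter
-- ===== SOURCE B (Python) =====
-- def text_len(stroke: str):
--     it = iter(stroke)
--     total = 0
--     for c in it:
--         if c == '<':
--             # consume the rest of the tag (through the next '>') from the same iterator
--             for d in it:
--                 if d == '>':
--                     break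
--         elif c != '>':
--             total += 1
--     return total
-- ===== Notes on version B (the rewrite author's own statement) =====
-- stated objective: alternative
-- what changed: Replaces A's per-character boolean-flag state machine with a flagless nested-loop skip: the outer loop counts visible characters and, on '<', an inner loop consumes the shared iterator up to the closing '>'.
import Mathlib
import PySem

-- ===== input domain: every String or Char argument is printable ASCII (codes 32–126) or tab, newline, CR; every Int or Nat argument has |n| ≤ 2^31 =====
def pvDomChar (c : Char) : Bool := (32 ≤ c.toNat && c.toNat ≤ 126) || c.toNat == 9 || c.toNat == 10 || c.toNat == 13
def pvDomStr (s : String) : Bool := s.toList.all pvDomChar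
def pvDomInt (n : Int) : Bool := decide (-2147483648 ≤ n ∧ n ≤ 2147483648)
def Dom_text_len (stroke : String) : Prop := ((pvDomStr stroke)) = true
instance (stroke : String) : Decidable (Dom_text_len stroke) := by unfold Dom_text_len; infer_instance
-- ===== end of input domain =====

-- B replaces A's per-character boolean-flag state machine by a flagless nested-loop skip
-- (on '<' an inner loop consumes the shared iterator through the next '>'); same cost, no speed claim.

-- ===== PORT A =====
-- one iteration of A's for-loop over (counter, isCount)
def stepA (st : Int × Bool) (sym : Char) : Int × Bool :=
  if sym = '<' then (st.1, false)            -- isCount = False; then 'if isCount' fails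
  else if sym = '>' then (st.1, true)        -- isCount = True; continue
  else if st.2 then (st.1 + 1, st.2) else st

def text_len (stroke : String) : Int :=
  (stroke.toList.foldl stepA (0, true)).1

-- ===== PORT B =====
-- inner 'for d in it: if d == ">": break' — returns what is left of the iterator
def skipTag : List Char → List Char
  | [] => []
  | d :: cs => if d = '>' then cs else skipTag cs

theorem skipTag_length_le (cs : List Char) : (skipTag cs).length ≤ cs.length := by
  induction cs with
  | nil => simp [skipTag]
  | cons d cs ih => simp only [skipTag]; split <;> simp; omega

-- outer 'for c in it' with accumulator total
def loopB (total : Int) : List Char → Int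
  | [] => total
  | c :: cs =>
    if c = '<' then loopB total (skipTag cs)
    else if c ≠ '>' then loopB (total + 1) cs
    else loopB total cs
termination_by cs => cs.length
decreasing_by
  · exact Nat.lt_succ_of_le (skipTag_length_le cs)
  · simp
  · simp

def text_len_alt (stroke : String) : Int := loopB 0 stroke.toList

-- ===== PRECONDITION & SPEC =====
def Spec_text_len (stroke : String) (out : Int) : Prop := out = text_len_alt stroke
instance (stroke : String) (out : Int) : Decidable (Spec_text_len stroke out) := by unfold Spec_text_len; infer_instance

-- ===== CLAIM (what is proved, stated in full; the proofs are below) =====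
def Claim_equal_text_len : Prop := ∀ (stroke : String), Dom_text_len stroke → Spec_text_len stroke (text_len stroke)

-- ===== LEMMAS AND PROOFS =====
-- invariant linking A's flag to B's skipping: with the flag up the fold computes loopB on the
-- remaining characters, with the flag down it computes loopB after the tag remainder is skipped
theorem foldA_eq_loopB (cs : List Char) : ∀ (n : Int) (b : Bool),
    (cs.foldl stepA (n, b)).1 = if b then loopB n cs else loopB n (skipTag cs) := by
  induction cs with
  | nil => intro n b; cases b <;> simp [loopB, skipTag]
  | cons c cs ih =>
    intro n b
    by_cases hlt : c = '<'
    · subst hlt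
      cases b <;> simp [stepA, skipTag, loopB, ih]
    · by_cases hgt : c = '>'
      · subst hgt
        cases b <;> simp [stepA, skipTag, loopB, ih]
      · cases b <;> simp [stepA, skipTag, loopB, hlt, hgt, ih]

-- ===== VERDICT (by name: the statement is the Claim_ definition above) =====
theorem text_len_spec : Claim_equal_text_len := by
  intro stroke _
  show text_len stroke = text_len_alt stroke
  simp [text_len, text_len_alt, foldA_eq_loopB]
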